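-- pv_equiv track=rewrite | github.com/weishao-yu/CPE | All_You_Need_Is_Love.py | solve
-- ===== SOURCE A (Python) =====
-- def GCD(result1, result2):
--     if result2 == 0:
--         return result1
--     else:
--         return GCD(result2, result1 % result2)
--
-- def solve(S1, S2):
--     length1 = len(S1)
--     length2 = len(S2)
--     if S1[0] == "0" or S2[0] == "0":
--         return False
--     if length1 == 1 or length2 == 1:
--         return False
--     result1 = 0
--     result2 = 0
--     S1 = S1[::-1]
--     S2 = S2[::-1]
--     count1 = 0
--     count2 = 0
--     for i in S1:
--         result1 += int(i) * (2 ** count1)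
--         count1 += 1
--     for j in S2:
--         result2 += int(j) * (2 ** count2)
--         count2 += 1
--     if GCD(result1, result2) == 1:
--         return False
--     else:
--         return True
-- ===== SOURCE B (Python) =====
-- def bin_value(s):
--     v = 0
--     for ch in s:
--         v = 2 * v + (ord(ch) - 48)
--     return v
--
-- def solve(S1, S2):
--     if S1[0] != "0" and S2[0] != "0" and len(S1) > 1 and len(S2) > 1:
--         a, b = bin_value(S1), bin_value(S2)
--         while b:
--             a, b = b, a % b
--         return a != 1
--     return False
-- ===== Notes on version B (the rewrite author's own statement) =====
-- stated objective: simpler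
-- what changed: Collapses A's two negative guard chains into one positive conjunction, replaces the reverse-the-string per-bit 2**count accumulation with a left-to-right Horner pass on character codes (ord(ch)-48, no per-char int() parse), and replaces the recursive GCD helper with an in-line iterative Euclidean loop ending in a direct 'a != 1' return.
import Mathlib
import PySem

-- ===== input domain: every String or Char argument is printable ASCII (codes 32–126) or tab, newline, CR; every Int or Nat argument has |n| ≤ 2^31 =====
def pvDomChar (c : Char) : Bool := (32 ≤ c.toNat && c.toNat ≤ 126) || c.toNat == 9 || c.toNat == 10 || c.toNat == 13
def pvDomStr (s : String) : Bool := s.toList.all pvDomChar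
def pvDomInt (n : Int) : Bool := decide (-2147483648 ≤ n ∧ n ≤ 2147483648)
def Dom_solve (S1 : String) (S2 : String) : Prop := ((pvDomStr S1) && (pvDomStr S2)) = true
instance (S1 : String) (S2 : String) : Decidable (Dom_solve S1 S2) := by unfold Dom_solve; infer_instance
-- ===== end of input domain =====

-- B folds A's two negative guard chains into one positive conjunction, builds each value by a
-- left-to-right Horner pass on character codes instead of A's reverse-then-2**count accumulation,
-- and replaces the recursive GCD helper with an in-line iterative Euclidean loop (objective: simpler).

-- the recursive step of both gcd computations shrinks |b| (Python % takes the divisor's sign)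
theorem pyMod_natAbs_lt (a : Int) {b : Int} (hb : b ≠ 0) :
    (PySem.Int.mod a b).natAbs < b.natAbs := by
  rcases lt_or_gt_of_ne hb with h | h
  · have := PySem.Int.mod_neg_bounds a h; omega
  · have h1 := PySem.Int.mod_nonneg a h; have h2 := PySem.Int.mod_lt a h; omega

-- ===== PORT A =====
-- int(i) for a single char; `none` (Python ValueError, non-digit char) is excluded by Pre_solve
def pyDigit (c : Char) : Int := (PySem.Int.ofChars? [c]).getD 0

-- def GCD(result1, result2): …  (recursive)
def gcdA (result1 result2 : Int) : Int :=
  if h : result2 = 0 then result1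
  else gcdA result2 (PySem.Int.mod result1 result2)
termination_by result2.natAbs
decreasing_by exact pyMod_natAbs_lt result1 h

def solve (S1 : String) (S2 : String) : Bool :=
  let l1 := S1.toList
  let l2 := S2.toList
  -- S1[0] == "0" or S2[0] == "0"  (IndexError on an empty string is excluded by Pre_solve)
  if (PySem.List.pyGet? l1 0).getD ' ' = '0' ∨ (PySem.List.pyGet? l2 0).getD ' ' = '0' then false
  else if l1.length = 1 ∨ l2.length = 1 then false
  else
    -- S1 = S1[::-1]; for i in S1: result1 += int(i) * 2**count1; count1 += 1
    let r1 := (l1.reverse.foldl (fun (p : Int × Nat) c => (p.1 + pyDigit c * 2 ^ p.2, p.2 + 1)) (0, 0)).1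
    let r2 := (l2.reverse.foldl (fun (p : Int × Nat) c => (p.1 + pyDigit c * 2 ^ p.2, p.2 + 1)) (0, 0)).1
    if gcdA r1 r2 = 1 then false else true

-- ===== PORT B =====
-- def bin_value(s): v = 0; for ch in s: v = 2*v + (ord(ch) - 48); return v
def binValue : Int → List Char → Int
  | v, [] => v
  | v, ch :: t => binValue (2 * v + ((ch.toNat : Int) - 48)) t

-- while b: a, b = b, a % b
def euclid (a b : Int) : Int :=
  if h : b ≠ 0 then euclid b (PySem.Int.mod a b) else a
termination_by b.natAbs
decreasing_by exact pyMod_natAbs_lt a h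

def solve_alt (S1 : String) (S2 : String) : Bool :=
  if S1.toList.headD ' ' ≠ '0' ∧ S2.toList.headD ' ' ≠ '0' ∧
      1 < S1.toList.length ∧ 1 < S2.toList.length then
    decide (euclid (binValue 0 S1.toList) (binValue 0 S2.toList) ≠ 1)
  else false

-- ===== PRECONDITION & SPEC =====
-- Pre_ holds exactly where A returns: S1 nonempty; then (short-circuit `or`) either S1[0]=='0',
-- or S2 is nonempty and either a guard fires or every char of both strings is a digit (int(c) raises ValueError otherwise).
def Pre_solve (S1 : String) (S2 : String) : Prop :=
  S1.toList ≠ [] ∧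
  (S1.toList.headD ' ' = '0' ∨
    (S2.toList ≠ [] ∧
      (S2.toList.headD ' ' = '0' ∨ S1.toList.length = 1 ∨ S2.toList.length = 1 ∨
        (S1.toList.all PySem.Chars.isdigit = true ∧ S2.toList.all PySem.Chars.isdigit = true))))
instance (S1 : String) (S2 : String) : Decidable (Pre_solve S1 S2) := by unfold Pre_solve; infer_instance

def pvWitness_solve : String × String := ("1010", "110")

def Spec_solve (S1 : String) (S2 : String) (out : Bool) : Prop := out = solve_alt S1 S2
instance (S1 : String) (S2 : String) (out : Bool) : Decidable (Spec_solve S1 S2 out) := by unfold Spec_solve; infer_instance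

-- ===== CLAIM (what is proved, stated in full; the proofs are below) =====
def Claim_equal_solve : Prop := ∀ (S1 : String) (S2 : String), Dom_solve S1 S2 → Pre_solve S1 S2 → Spec_solve S1 S2 (solve S1 S2)

-- ===== LEMMAS AND PROOFS =====

-- s[0] with the ' ' default is List.headD
theorem get0_headD (l : List Char) : (PySem.List.pyGet? l 0).getD ' ' = l.headD ' ' := by
  cases l <;> simp [PySem.List.pyGet?_zero]

theorem digit_cases (c : Char) (h : PySem.Chars.isdigit c = true) :
    c = '0' ∨ c = '1' ∨ c = '2' ∨ c = '3' ∨ c = '4' ∨ c = '5' ∨ c = '6' ∨ c = '7' ∨ c = '8' ∨ c = '9' := by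
  simp only [PySem.Chars.isdigit, Bool.and_eq_true, decide_eq_true_eq, Char.le_def] at h
  obtain ⟨h1, h2⟩ := h
  have b1 : 48 ≤ c.val.toNat := h1
  have b2 : c.val.toNat ≤ 57 := h2
  have hd : c.val.toNat = 48 ∨ c.val.toNat = 49 ∨ c.val.toNat = 50 ∨ c.val.toNat = 51 ∨ c.val.toNat = 52 ∨
      c.val.toNat = 53 ∨ c.val.toNat = 54 ∨ c.val.toNat = 55 ∨ c.val.toNat = 56 ∨ c.val.toNat = 57 := by omega
  rcases hd with h|h|h|h|h|h|h|h|h|h <;> simp [Char.ext_iff, ← UInt32.toNat_inj, h]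

-- on a digit character, int(c) is its code minus 48
theorem pyDigit_eq (c : Char) (h : PySem.Chars.isdigit c = true) : pyDigit c = (c.toNat : Int) - 48 := by
  rcases digit_cases c h with h|h|h|h|h|h|h|h|h|h <;> subst h <;> decide

-- A's reversed power-of-two accumulation, started at (a, k), equals a + 2^k times the Horner value of the unreversed list
theorem foldA_eq_horner (l : List Char) (a : Int) (k : Nat) :
    (l.foldl (fun (p : Int × Nat) c => (p.1 + pyDigit c * 2 ^ p.2, p.2 + 1)) (a, k)).1
      = a + 2 ^ k * (l.reverse.foldl (fun a c => a * 2 + pyDigit c) 0) := by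
  induction l generalizing a k with
  | nil => simp
  | cons c t ih =>
      simp only [List.foldl_cons, List.reverse_cons, List.foldl_append, List.foldl_cons,
        List.foldl_nil, ih]
      ring

-- B's Horner recursion computes the same fold, once every character is a digit
theorem binValue_eq (l : List Char) (v : Int) (h : ∀ c ∈ l, PySem.Chars.isdigit c = true) :
    binValue v l = l.foldl (fun a c => a * 2 + pyDigit c) v := by
  induction l generalizing v with
  | nil => rfl
  | cons c t ih =>
      have hc : PySem.Chars.isdigit c = true := h c (List.mem_cons_self ..)
      simp only [binValue, List.foldl_cons]
      rw [show (2 * v + ((c.toNat : Int) - 48)) = v * 2 + pyDigit c by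
        rw [pyDigit_eq c hc]; ring]
      exact ih _ (fun d hd => h d (List.mem_cons_of_mem _ hd))

theorem gcdA_eq_euclid (r1 r2 : Int) : gcdA r1 r2 = euclid r1 r2 := by
  induction r1, r2 using gcdA.induct <;> (rw [gcdA, euclid]; simp_all)

-- ===== VERDICT (by name: the statement is the Claim_ definition above) =====
theorem solve_spec : Claim_equal_solve := by
  intro S1 S2 _ hpre
  obtain ⟨h1ne, hrest⟩ := hpre
  unfold Spec_solve solve solve_alt
  simp only [get0_headD]
  by_cases hA : S1.toList.headD ' ' = '0' ∨ S2.toList.headD ' ' = '0'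
  · have hB : ¬(S1.toList.headD ' ' ≠ '0' ∧ S2.toList.headD ' ' ≠ '0' ∧
        1 < S1.toList.length ∧ 1 < S2.toList.length) := by tauto
    rw [if_pos hA, if_neg hB]
  · push_neg at hA
    obtain ⟨ha1, ha2⟩ := hA
    by_cases hL : S1.toList.length = 1 ∨ S2.toList.length = 1
    · have hB : ¬(S1.toList.headD ' ' ≠ '0' ∧ S2.toList.headD ' ' ≠ '0' ∧
          1 < S1.toList.length ∧ 1 < S2.toList.length) := by
        rintro ⟨_, _, k1, k2⟩; rcases hL with h | h <;> omega
      rw [if_neg (by tauto : ¬(S1.toList.headD ' ' = '0' ∨ S2.toList.headD ' ' = '0')),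
        if_pos hL, if_neg hB]
    · push_neg at hL
      obtain ⟨hl1, hl2⟩ := hL
      rcases hrest with h0 | ⟨h2ne, hrest⟩
      · exact absurd h0 ha1
      have hd : S1.toList.all PySem.Chars.isdigit = true ∧ S2.toList.all PySem.Chars.isdigit = true := by
        rcases hrest with h | h | h | h
        · exact absurd h ha2
        · exact absurd h hl1
        · exact absurd h hl2
        · exact h
      have hlen1 : 1 < S1.toList.length := by
        have := List.length_pos_iff.mpr h1ne; omega
      have hlen2 : 1 < S2.toList.length := by
        have := List.length_pos_iff.mpr h2ne; omega
      have hB : S1.toList.headD ' ' ≠ '0' ∧ S2.toList.headD ' ' ≠ '0' ∧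
          1 < S1.toList.length ∧ 1 < S2.toList.length := ⟨ha1, ha2, hlen1, hlen2⟩
      rw [if_neg (by tauto : ¬(S1.toList.headD ' ' = '0' ∨ S2.toList.headD ' ' = '0')),
        if_neg (by rintro (h | h) <;> omega : ¬(S1.toList.length = 1 ∨ S2.toList.length = 1)),
        if_pos hB]
      rw [foldA_eq_horner, foldA_eq_horner, List.reverse_reverse, List.reverse_reverse,
        binValue_eq _ _ (by simpa [List.all_eq_true] using hd.1),
        binValue_eq _ _ (by simpa [List.all_eq_true] using hd.2),
        gcdA_eq_euclid]
      simp only [zero_add, pow_zero, one_mul]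
      by_cases hg : euclid (S1.toList.foldl (fun a c => a * 2 + pyDigit c) 0)
          (S2.toList.foldl (fun a c => a * 2 + pyDigit c) 0) = 1 <;> simp [hg]
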